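-- pv_equiv track=rewrite | github.com/vvalotto/software_limpio | src/quality_agents/designreviewer/analyzers/data_clumps_analyzer.py | _encontrar_clumps
-- ===== SOURCE A (Python) =====
-- from collections import defaultdict
-- from itertools import combinations
-- from typing import Any, Dict, FrozenSet, List, Optional, Set, Tuple
--
-- def _encontrar_clumps(
--
--     firmas: List[Tuple[str, FrozenSet[str]]],
--     min_size: int,
--     min_occurrences: int,
-- ) -> List[Tuple[FrozenSet[str], Set[str]]]:
--     """
--     Detecta todos los clumps máximos que cumplen las condiciones.
--
--     Pasos:
--     1. Generar todos los subconjuntos de tamaño >= min_size de cada firma.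
--     2. Contar en cuántas funciones distintas aparece cada subconjunto.
--     3. Filtrar los que aparecen en >= min_occurrences funciones.
--     4. Eliminar sub-clumps: si {a,b,c,d} es un clump válido, omitir {a,b,c}.
--
--     Returns:
--         Lista de (clump, set_de_funciones) ordenada de mayor a menor tamaño.
--     """
--     # Paso 1 y 2: contar apariciones por subconjunto
--     conteo: Dict[FrozenSet[str], Set[str]] = defaultdict(set)
--
--     for nombre, params in firmas:
--         max_size = len(params)
--         for size in range(min_size, max_size + 1):
--             for combo in combinations(sorted(params), size):
--                 conteo[frozenset(combo)].add(nombre)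
--
--     # Paso 3: filtrar por min_occurrences
--     candidatos = {
--         clump: funcs
--         for clump, funcs in conteo.items()
--         if len(funcs) >= min_occurrences
--     }
--
--     if not candidatos:
--         return []
--
--     # Paso 4: conservar solo clumps máximos (no sub-clumps de uno ya seleccionado)
--     clumps_ordenados = sorted(candidatos.keys(), key=len, reverse=True)
--     seleccionados: List[FrozenSet[str]] = []
--
--     for clump in clumps_ordenados:
--         es_subclump = any(clump < mayor for mayor in seleccionados)
--         if not es_subclump:
--             seleccionados.append(clump)
--
--     return [(clump, candidatos[clump]) for clump in seleccionados]
-- ===== SOURCE B (Python) =====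
-- from itertools import combinations
--
--
-- def _encontrar_clumps(firmas, min_size, min_occurrences):
--     # Flatten steps 1-2 into one stream of (combo, nombre) pairs, grouped once.
--     pares = [
--         (combo, nombre)
--         for nombre, params in firmas
--         for size in range(min_size, len(params) + 1)
--         for combo in combinations(sorted(params), size)
--     ]
--     conteo = {}
--     for combo, nombre in pares:
--         clave = frozenset(combo)
--         conteo[clave] = conteo.get(clave, frozenset()) | {nombre}
--     candidatos = {c: f for c, f in conteo.items() if len(f) >= min_occurrences}
--     # A clump is kept iff no candidate is a strict superset of it (maximality
--     # against the full candidate set; no selected-accumulator needed).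
--     return [
--         (c, set(candidatos[c]))
--         for c in sorted(candidatos, key=len, reverse=True)
--         if not any(c < o for o in candidatos)
--     ]
-- ===== Notes on version B (the rewrite author's own statement) =====
-- stated objective: alternative
-- what changed: B flattens steps 1-2 into a single (combo, name) stream grouped once with dict.get, and replaces step 4's greedy selected-accumulator loop by a direct maximality test of each candidate against the full candidate set, keeping the same size-descending stable output order.
import Mathlib
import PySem

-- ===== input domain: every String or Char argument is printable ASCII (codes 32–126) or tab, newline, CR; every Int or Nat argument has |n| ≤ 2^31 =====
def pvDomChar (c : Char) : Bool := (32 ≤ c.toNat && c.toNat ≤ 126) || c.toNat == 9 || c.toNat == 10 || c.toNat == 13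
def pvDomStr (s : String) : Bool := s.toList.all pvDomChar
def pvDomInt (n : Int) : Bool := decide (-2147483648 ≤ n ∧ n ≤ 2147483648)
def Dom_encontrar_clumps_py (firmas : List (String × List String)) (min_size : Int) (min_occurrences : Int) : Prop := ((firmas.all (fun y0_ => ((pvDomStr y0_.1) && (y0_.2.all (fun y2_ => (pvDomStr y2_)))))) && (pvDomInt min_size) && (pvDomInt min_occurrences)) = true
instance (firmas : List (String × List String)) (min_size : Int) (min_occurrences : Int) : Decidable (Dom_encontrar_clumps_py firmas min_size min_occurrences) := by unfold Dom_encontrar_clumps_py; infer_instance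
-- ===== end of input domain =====

-- B replaces A's nested defaultdict loops by one flattened (combo, name) stream grouped once,
-- and replaces the greedy `seleccionados` accumulator by a direct maximality test against the
-- full candidate set (objective: alternative decomposition, same asymptotic cost).

-- ===== PORT A =====
-- Python's `a < b` on frozensets (proper subset), with frozensets as canonical lists.
def pyFrozensetLt (a b : List String) : Bool :=
  (a.all (fun x => b.contains x)) && !(b.all (fun y => a.contains y))

def encontrar_clumps_py (firmas : List (String × List String)) (min_size : Int) (min_occurrences : Int) : List (List String × List String) :=
  -- Paso 1 y 2: conteo = defaultdict(set); frozensets are kept as sorted duplicate-free lists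
  let conteo : PySem.Dict (List String) (PySem.Set String) :=
    firmas.foldl (fun d pr =>
      let params := PySem.Set.ofList pr.2            -- the frozenset argument
      let max_size : Int := (params.length : Int)
      (PySem.List.pyRange min_size (max_size + 1) 1).foldl (fun d sz =>
        (PySem.List.combinations (PySem.List.sorted params (fun x => x) false) sz.toNat).foldl
          (fun d combo => d.modify combo PySem.Set.empty (fun s => PySem.Set.add s pr.1)) d) d)
      PySem.Dict.empty
  -- Paso 3: filtrar por min_occurrences
  let candidatos : PySem.Dict (List String) (PySem.Set String) :=
    conteo.items.foldl (fun d p =>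
      if min_occurrences ≤ (p.2.length : Int) then d.insert p.1 p.2 else d) PySem.Dict.empty
  if candidatos.size = 0 then []
  else
    -- Paso 4: greedy selection over keys sorted by size, descending (stable)
    let clumps_ordenados := PySem.List.sorted candidatos.keys List.length true
    let seleccionados : List (List String) :=
      clumps_ordenados.foldl (fun sel clump =>
        if sel.any (fun mayor => pyFrozensetLt clump mayor) then sel else sel ++ [clump]) []
    seleccionados.map (fun clump => (clump, candidatos.getD clump []))

-- ===== PORT B =====
def encontrar_clumps_py_alt (firmas : List (String × List String)) (min_size : Int) (min_occurrences : Int) : List (List String × List String) :=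
  -- one flat stream of (combo, nombre) pairs
  let pares : List (List String × String) :=
    firmas.flatMap (fun pr =>
      let params := PySem.Set.ofList pr.2
      (PySem.List.pyRange min_size ((params.length : Int) + 1) 1).flatMap (fun size =>
        (PySem.List.combinations (PySem.List.sorted params (fun x => x) false) size.toNat).map
          (fun combo => (combo, pr.1))))
  -- grouped once: conteo[clave] = conteo.get(clave, frozenset()) | {nombre}
  let conteo : PySem.Dict (List String) (PySem.Set String) :=
    pares.foldl (fun d q =>
      d.insert q.1 (PySem.Set.union (d.getD q.1 PySem.Set.empty) [q.2])) PySem.Dict.empty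
  let candidatos : PySem.Dict (List String) (PySem.Set String) :=
    (conteo.items.filter (fun p => decide (min_occurrences ≤ (p.2.length : Int)))).foldl
      (fun d p => d.insert p.1 p.2) PySem.Dict.empty
  -- keep a clump iff no candidate is a strict superset of it
  ((PySem.List.sorted candidatos.keys List.length true).filter
      (fun c => !(candidatos.keys.any (fun o => pyFrozensetLt c o)))).map
    (fun c => (c, PySem.Set.ofList (candidatos.getD c [])))

-- ===== PRECONDITION & SPEC =====
-- Pre_ excludes exactly the inputs where Python A raises ValueError: a negative min_size
-- reaches combinations(..., r) with r < 0 whenever firmas is non-empty.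
def Pre_encontrar_clumps_py (firmas : List (String × List String)) (min_size : Int) (min_occurrences : Int) : Prop :=
  0 ≤ min_size ∨ firmas = []
instance (firmas : List (String × List String)) (min_size : Int) (min_occurrences : Int) : Decidable (Pre_encontrar_clumps_py firmas min_size min_occurrences) := by unfold Pre_encontrar_clumps_py; infer_instance

def pvWitness_encontrar_clumps_py : (List (String × List String)) × Int × Int :=
  ([("f", ["a", "b", "c"]), ("g", ["b", "a"]), ("h", ["a", "b"])], 1, 2)

def Spec_encontrar_clumps_py (firmas : List (String × List String)) (min_size : Int) (min_occurrences : Int) (out : List (List String × List String)) : Prop := out = encontrar_clumps_py_alt firmas min_size min_occurrences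
instance (firmas : List (String × List String)) (min_size : Int) (min_occurrences : Int) (out : List (List String × List String)) : Decidable (Spec_encontrar_clumps_py firmas min_size min_occurrences out) := by unfold Spec_encontrar_clumps_py; infer_instance

-- ===== CLAIM (what is proved, stated in full; the proofs are below) =====
def Claim_equal_encontrar_clumps_py : Prop := ∀ (firmas : List (String × List String)) (min_size : Int) (min_occurrences : Int), Dom_encontrar_clumps_py firmas min_size min_occurrences → Pre_encontrar_clumps_py firmas min_size min_occurrences → Spec_encontrar_clumps_py firmas min_size min_occurrences (encontrar_clumps_py firmas min_size min_occurrences)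

-- ===== LEMMAS AND PROOFS =====

-- Common shapes both ports reduce to (proof-side helpers only).
def pvPares (firmas : List (String × List String)) (min_size : Int) : List (List String × String) :=
  firmas.flatMap (fun pr =>
    let params := PySem.Set.ofList pr.2
    (PySem.List.pyRange min_size ((params.length : Int) + 1) 1).flatMap (fun size =>
      (PySem.List.combinations (PySem.List.sorted params (fun x => x) false) size.toNat).map
        (fun combo => (combo, pr.1))))

def pvConteo (pares : List (List String × String)) : PySem.Dict (List String) (PySem.Set String) :=
  pares.foldl (fun d q => d.modify q.1 PySem.Set.empty (fun s => PySem.Set.add s q.2)) PySem.Dict.empty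

def pvCand (firmas : List (String × List String)) (min_size : Int) (min_occurrences : Int) : PySem.Dict (List String) (PySem.Set String) :=
  ((pvConteo (pvPares firmas min_size)).items.filter
      (fun p => decide (min_occurrences ≤ (p.2.length : Int)))).foldl
    (fun d p => d.insert p.1 p.2) PySem.Dict.empty

lemma portB_eq (firmas : List (String × List String)) (min_size min_occurrences : Int) :
    encontrar_clumps_py_alt firmas min_size min_occurrences =
      ((PySem.List.sorted (pvCand firmas min_size min_occurrences).keys List.length true).filter
          (fun c => !((pvCand firmas min_size min_occurrences).keys.any (fun o => pyFrozensetLt c o)))).map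
        (fun c => (c, PySem.Set.ofList ((pvCand firmas min_size min_occurrences).getD c []))) := rfl

lemma conteoA_eq (firmas : List (String × List String)) (min_size : Int) :
    firmas.foldl (fun d pr =>
      let params := PySem.Set.ofList pr.2
      let max_size : Int := (params.length : Int)
      (PySem.List.pyRange min_size (max_size + 1) 1).foldl (fun d sz =>
        (PySem.List.combinations (PySem.List.sorted params (fun x => x) false) sz.toNat).foldl
          (fun d combo => d.modify combo PySem.Set.empty (fun s => PySem.Set.add s pr.1)) d) d)
      PySem.Dict.empty = pvConteo (pvPares firmas min_size) := by
  unfold pvConteo pvPares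
  rw [List.foldl_flatMap]
  refine List.foldl_ext _ _ _ (fun d pr _ => ?_)
  simp only [List.foldl_flatMap, List.foldl_map]

lemma portA_eq (firmas : List (String × List String)) (min_size min_occurrences : Int) :
    encontrar_clumps_py firmas min_size min_occurrences =
      (if (pvCand firmas min_size min_occurrences).size = 0 then [] else
        ((PySem.List.sorted (pvCand firmas min_size min_occurrences).keys List.length true).foldl
            (fun sel clump => if sel.any (fun mayor => pyFrozensetLt clump mayor) then sel else sel ++ [clump]) []).map
          (fun clump => (clump, (pvCand firmas min_size min_occurrences).getD clump []))) := by
  simp only [encontrar_clumps_py]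
  rw [conteoA_eq, PySem.List.foldl_ite_eq_foldl_filter]
  rfl

-- ----- facts about pyFrozensetLt -----

lemma pyFrozensetLt_iff (a b : List String) :
    pyFrozensetLt a b = true ↔ (∀ x ∈ a, x ∈ b) ∧ ∃ y ∈ b, y ∉ a := by
  simp [pyFrozensetLt]

lemma pyFrozensetLt_length {a b : List String} (ha : a.Nodup) (h : pyFrozensetLt a b = true) :
    a.length < b.length := by
  rw [pyFrozensetLt_iff] at h
  obtain ⟨hsub, y, hyb, hya⟩ := h
  have hsub' : a ⊆ b.erase y := by
    intro x hx
    have hxy : x ≠ y := fun he => hya (he ▸ hx)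
    exact (List.mem_erase_of_ne hxy).mpr (hsub x hx)
  have h1 : a.length ≤ (b.erase y).length := (List.Nodup.subperm ha hsub').length_le
  have h2 : (b.erase y).length = b.length - 1 := List.length_erase_of_mem hyb
  have h3 : 0 < b.length := List.length_pos_of_mem hyb
  omega

lemma pyFrozensetLt_trans {a b c : List String} (h1 : pyFrozensetLt a b = true)
    (h2 : pyFrozensetLt b c = true) : pyFrozensetLt a c = true := by
  rw [pyFrozensetLt_iff] at *
  obtain ⟨hab, _⟩ := h1
  obtain ⟨hbc, y, hyc, hyb⟩ := h2
  exact ⟨fun x hx => hbc x (hab x hx), y, hyc, fun hya => hyb (hab y hya)⟩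

lemma exists_maximal (K : List (List String)) (hel : ∀ c ∈ K, c.Nodup) (c : List String)
    (h : K.any (fun o => pyFrozensetLt c o) = true) :
    ∃ o ∈ K, pyFrozensetLt c o = true ∧ K.any (fun o' => pyFrozensetLt o o') = false := by
  by_contra hcon
  have hcon' : ∀ o ∈ K, pyFrozensetLt c o = true →
      K.any (fun o' => pyFrozensetLt o o') ≠ false :=
    fun o ho hlt hf => hcon ⟨o, ho, hlt, hf⟩
  have chain : ∀ n : Nat, ∃ o ∈ K, pyFrozensetLt c o = true ∧ n ≤ o.length := by
    intro n
    induction n with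
    | zero =>
      obtain ⟨o, hoK, ho⟩ := List.any_eq_true.mp h
      exact ⟨o, hoK, ho, Nat.zero_le _⟩
    | succ n ih =>
      obtain ⟨o, hoK, hco, hno⟩ := ih
      have hne := hcon' o hoK hco
      have : K.any (fun o' => pyFrozensetLt o o') = true := by
        cases hb : K.any (fun o' => pyFrozensetLt o o') with
        | false => exact absurd hb hne
        | true => rfl
      obtain ⟨o', ho'K, hoo'⟩ := List.any_eq_true.mp this
      refine ⟨o', ho'K, pyFrozensetLt_trans hco hoo', ?_⟩
      have := pyFrozensetLt_length (hel o hoK) hoo'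
      omega
  obtain ⟨o, hoK, _, hle⟩ := chain ((K.map List.length).sum + 1)
  have hmem : o.length ∈ K.map List.length := List.mem_map_of_mem hoK
  have : o.length ≤ (K.map List.length).sum :=
    List.single_le_sum (fun x _ => Nat.zero_le x) _ hmem
  omega

-- ----- the greedy fold over a size-descending list selects exactly the maximal clumps -----

lemma greedy_eq_filter (K : List (List String)) (hel : ∀ c ∈ K, c.Nodup) :
    ∀ (S P : List (List String)),
      (P ++ S).Pairwise (fun a b => b.length ≤ a.length) →
      (∀ x, x ∈ P ++ S ↔ x ∈ K) →
      S.foldl (fun sel c => if sel.any (fun m => pyFrozensetLt c m) then sel else sel ++ [c])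
          (P.filter (fun c => !(K.any (fun o => pyFrozensetLt c o))))
        = (P ++ S).filter (fun c => !(K.any (fun o => pyFrozensetLt c o))) := by
  intro S
  induction S with
  | nil => intro P _ _; simp
  | cons c S' ih =>
    intro P hpw hmem
    have hsplit : P ++ c :: S' = (P ++ [c]) ++ S' := by simp
    have hcK : c ∈ K := (hmem c).mp (by simp)
    by_cases hK : K.any (fun o => pyFrozensetLt c o) = true
    · -- c is a strict subset of some candidate; a maximal superset is already in the accumulator
      obtain ⟨o, hoK, hco, homax⟩ := exists_maximal K hel c hK
      have hlen : c.length < o.length := pyFrozensetLt_length (hel c hcK) hco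
      have hoP : o ∈ P := by
        have ho : o ∈ P ++ c :: S' := (hmem o).mpr hoK
        rcases List.mem_append.mp ho with h | h
        · exact h
        · exfalso
          rcases List.mem_cons.mp h with h | h
          · subst h; omega
          · have := (List.pairwise_cons.mp (List.pairwise_append.mp hpw).2.1).1 o h
            omega
      have hacc : (P.filter (fun x => !(K.any (fun o => pyFrozensetLt x o)))).any
          (fun m => pyFrozensetLt c m) = true := by
        refine List.any_eq_true.mpr ⟨o, ?_, hco⟩
        refine List.mem_filter.mpr ⟨hoP, ?_⟩
        simp [homax]
      have hPc : (P ++ [c]).filter (fun x => !(K.any (fun o => pyFrozensetLt x o)))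
          = P.filter (fun x => !(K.any (fun o => pyFrozensetLt x o))) := by
        rw [List.filter_append]
        simp [hK]
      rw [List.foldl_cons, if_pos hacc, hsplit, ← hPc]
      exact ih (P ++ [c]) (hsplit ▸ hpw) (fun x => hsplit ▸ hmem x)
    · -- c is maximal: it is appended
      have hKf : K.any (fun o => pyFrozensetLt c o) = false := by
        cases hb : K.any (fun o => pyFrozensetLt c o) with
        | false => rfl
        | true => exact absurd hb hK
      have hacc : (P.filter (fun x => !(K.any (fun o => pyFrozensetLt x o)))).any
          (fun m => pyFrozensetLt c m) = false := by
        rw [List.any_eq_false]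
        intro m hm hcm
        have hmP := (List.mem_filter.mp hm).1
        have hmK : m ∈ K := (hmem m).mp (List.mem_append.mpr (Or.inl hmP))
        have : K.any (fun o => pyFrozensetLt c o) = true := List.any_eq_true.mpr ⟨m, hmK, hcm⟩
        exact hK this
      have hPc : (P ++ [c]).filter (fun x => !(K.any (fun o => pyFrozensetLt x o)))
          = P.filter (fun x => !(K.any (fun o => pyFrozensetLt x o))) ++ [c] := by
        rw [List.filter_append]
        simp [hKf]
      rw [List.foldl_cons, if_neg (by simp [hacc]), hsplit, ← hPc]
      exact ih (P ++ [c]) (hsplit ▸ hpw) (fun x => hsplit ▸ hmem x)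

-- ----- structural facts about the candidate dictionary -----

lemma pvPares_fst_nodup (firmas : List (String × List String)) (min_size : Int) :
    ∀ q ∈ pvPares firmas min_size, q.1.Nodup := by
  intro q hq
  simp only [pvPares, List.mem_flatMap, List.mem_map] at hq
  obtain ⟨pr, _, sz, _, combo, hcombo, rfl⟩ := hq
  have hsl := PySem.List.sublist_of_mem_combinations hcombo
  have hnd : (PySem.List.sorted (PySem.Set.ofList pr.2) (fun x => x) false).Nodup :=
    (PySem.List.sorted_perm _ _ _).nodup_iff.mpr (PySem.Set.nodup_ofList _)
  exact hnd.sublist hsl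

lemma pvConteo_keys_sub (pares : List (List String × String)) :
    ∀ k ∈ (pvConteo pares).keys, k ∈ pares.map Prod.fst := by
  intro k hk
  unfold pvConteo at hk
  rw [PySem.Dict.keys_foldl_modify_key] at hk
  rw [PySem.Dict.keys_empty, PySem.Set.update_nil_left] at hk
  exact (PySem.Set.mem_ofList _ _).mp hk

lemma pvConteo_values_nodup (pares : List (List String × String)) :
    ∀ v ∈ (pvConteo pares).values, v.Nodup := by
  unfold pvConteo
  suffices h : ∀ (l : List (List String × String)) (d : PySem.Dict (List String) (PySem.Set String)),
      (∀ v ∈ d.values, v.Nodup) →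
      ∀ v ∈ (l.foldl (fun d q => d.modify q.1 PySem.Set.empty (fun s => PySem.Set.add s q.2)) d).values, v.Nodup by
    exact h pares PySem.Dict.empty (by intro v hv; simp [PySem.Dict.values, show (PySem.Dict.empty : PySem.Dict (List String) (PySem.Set String)).items = [] from rfl] at hv)
  intro l
  induction l with
  | nil => intro d hd; exact hd
  | cons q l ih =>
    intro d hd
    rw [List.foldl_cons]
    refine ih _ (fun v hv => ?_)
    have : (d.modify q.1 PySem.Set.empty (fun s => PySem.Set.add s q.2))
        = d.insert q.1 (PySem.Set.add (d.getD q.1 PySem.Set.empty) q.2) := rfl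
    rw [this] at hv
    rcases PySem.Dict.mem_values_insert _ _ _ _ hv with h | h
    · subst h
      refine PySem.Set.nodup_add _ _ ?_
      cases hg : d.get? q.1 with
      | none => rw [PySem.Dict.getD_of_get?_eq_none _ _ hg]; exact List.nodup_nil
      | some v' =>
        rw [PySem.Dict.getD_of_get?_eq_some _ _ hg]
        have : (q.1, v') ∈ d.items := PySem.Dict.mem_items_of_get?_eq_some _ hg
        exact hd v' (List.mem_map_of_mem this)
    · exact hd v h

lemma pvCand_keys_nodup_elems (firmas : List (String × List String)) (min_size min_occurrences : Int) :
    ∀ c ∈ (pvCand firmas min_size min_occurrences).keys, c.Nodup := by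
  intro c hc
  unfold pvCand at hc
  rw [PySem.Dict.keys_foldl_insert_key, PySem.Dict.keys_empty, PySem.Set.update_nil_left] at hc
  rw [PySem.Set.mem_ofList] at hc
  obtain ⟨p, hp, rfl⟩ := List.mem_map.mp hc
  have hpi : p ∈ (pvConteo (pvPares firmas min_size)).items := List.mem_of_mem_filter hp
  have hk : p.1 ∈ (pvConteo (pvPares firmas min_size)).keys := List.mem_map_of_mem hpi
  obtain ⟨q, hq, hq1⟩ := List.mem_map.mp (pvConteo_keys_sub _ _ hk)
  exact hq1 ▸ pvPares_fst_nodup firmas min_size q hq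

lemma pvCand_values_nodup (firmas : List (String × List String)) (min_size min_occurrences : Int) :
    ∀ v ∈ (pvCand firmas min_size min_occurrences).values, v.Nodup := by
  unfold pvCand
  suffices h : ∀ (l : List (List String × PySem.Set String)) (d : PySem.Dict (List String) (PySem.Set String)),
      (∀ v ∈ d.values, v.Nodup) → (∀ p ∈ l, p.2.Nodup) →
      ∀ v ∈ (l.foldl (fun d p => d.insert p.1 p.2) d).values, v.Nodup by
    refine h _ PySem.Dict.empty (by intro v hv; simp [PySem.Dict.values, show (PySem.Dict.empty : PySem.Dict (List String) (PySem.Set String)).items = [] from rfl] at hv) (fun p hp => ?_)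
    have hpi := List.mem_of_mem_filter hp
    exact pvConteo_values_nodup _ _ (List.mem_map_of_mem hpi)
  intro l
  induction l with
  | nil => intro d hd _; exact hd
  | cons p l ih =>
    intro d hd hl
    rw [List.foldl_cons]
    refine ih _ (fun v hv => ?_) (fun p hp => hl p (List.mem_cons_of_mem _ hp))
    rcases PySem.Dict.mem_values_insert _ _ _ _ hv with h | h
    · exact h ▸ hl p (List.mem_cons_self)
    · exact hd v h

lemma pvCand_getD_nodup (firmas : List (String × List String)) (min_size min_occurrences : Int)
    (c : List String) : ((pvCand firmas min_size min_occurrences).getD c []).Nodup := by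
  cases hg : (pvCand firmas min_size min_occurrences).get? c with
  | none => rw [PySem.Dict.getD_of_get?_eq_none _ _ hg]; exact List.nodup_nil
  | some v =>
    rw [PySem.Dict.getD_of_get?_eq_some _ _ hg]
    exact pvCand_values_nodup firmas min_size min_occurrences v
      (List.mem_map_of_mem (PySem.Dict.mem_items_of_get?_eq_some _ hg))

-- ===== VERDICT (by name: the statement is the Claim_ definition above) =====
theorem encontrar_clumps_py_spec : Claim_equal_encontrar_clumps_py := by
  intro firmas min_size min_occurrences _ _
  unfold Spec_encontrar_clumps_py
  rw [portA_eq, portB_eq]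
  set C := pvCand firmas min_size min_occurrences with hC
  by_cases hsz : C.size = 0
  · rw [if_pos hsz]
    have hitems : C.items = [] := List.length_eq_zero_iff.mp hsz
    have hkeys : C.keys = [] := by simp [PySem.Dict.keys, hitems]
    rw [hkeys]
    simp [PySem.List.sorted_eq_nil_iff]
  · rw [if_neg hsz]
    have hel : ∀ c ∈ C.keys, c.Nodup := pvCand_keys_nodup_elems firmas min_size min_occurrences
    have hgf := greedy_eq_filter C.keys hel
      (PySem.List.sorted C.keys List.length true) []
      (by simp only [List.nil_append]; exact PySem.List.sorted_pairwise_rev C.keys List.length)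
      (by
        intro x
        rw [List.nil_append]
        exact (PySem.List.sorted_perm C.keys List.length true).mem_iff)
    simp only [List.nil_append, List.filter_nil] at hgf
    rw [hgf]
    refine List.map_congr_left (fun c _ => ?_)
    rw [PySem.Set.ofList_eq_self_of_nodup _ (pvCand_getD_nodup firmas min_size min_occurrences c)]
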